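-- pv_equiv track=rewrite | github.com/jstck/aoc | 2023/14/solution.py | packrocks
-- ===== SOURCE A (Python) =====
-- def packrocks(s: str) -> str:
--     parts = s.split("#")
--     newparts = []
--
--     for p in parts:
--         rocks = p.count("O")
--         empty = p.count(".")
--         newparts.append("O" * rocks + "."*empty)
--
--     return "#".join(newparts)
-- ===== SOURCE B (Python) =====
-- def packrocks(s: str) -> str:
--     out = []
--     o = d = 0
--     for c in s:
--         if c == '#':
--             out.append("O" * o + "." * d + "#")
--             o = d = 0
--         elif c == 'O':
--             o += 1
--         elif c == '.':
--             d += 1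
--     out.append("O" * o + "." * d)
--     return "".join(out)
-- ===== Notes on version B (the rewrite author's own statement) =====
-- stated objective: alternative
-- what changed: Replaces the split/count/rebuild/join pipeline by a single left-to-right scan that keeps two counters per segment and flushes them at each separator and at the end.
import Mathlib
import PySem

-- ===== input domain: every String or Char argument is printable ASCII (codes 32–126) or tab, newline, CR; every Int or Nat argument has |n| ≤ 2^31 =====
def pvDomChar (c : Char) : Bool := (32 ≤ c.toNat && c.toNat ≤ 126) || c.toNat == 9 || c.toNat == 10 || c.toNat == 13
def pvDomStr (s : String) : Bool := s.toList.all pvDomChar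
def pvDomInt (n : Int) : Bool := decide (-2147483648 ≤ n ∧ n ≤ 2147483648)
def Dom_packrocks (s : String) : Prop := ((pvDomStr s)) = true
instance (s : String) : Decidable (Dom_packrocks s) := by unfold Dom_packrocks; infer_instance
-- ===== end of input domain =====

-- B replaces the split/count/join pipeline by one left-to-right scan with two counters (alternative decomposition, same O(n) cost).

-- ===== PORT A =====
def packrocks (s : String) : String :=
  let parts := PySem.Chars.splitOn s.toList ['#']
  let newparts := parts.foldl (fun acc p =>
    let rocks := PySem.Chars.count p ['O']
    let empty := PySem.Chars.count p ['.']
    acc ++ [List.replicate rocks 'O' ++ List.replicate empty '.']) ([] : List (List Char))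
  String.ofList (PySem.Chars.join ['#'] newparts)

-- ===== PORT B =====
-- one step of B's scan: '#': flush counters, 'O'/'.': bump the matching counter, else ignore
def packrocksStep (st : List (List Char) × Nat × Nat) (c : Char) : List (List Char) × Nat × Nat :=
  let (out, o, d) := st
  if c = '#' then (out ++ [List.replicate o 'O' ++ List.replicate d '.' ++ ['#']], 0, 0)
  else if c = 'O' then (out, o + 1, d)
  else if c = '.' then (out, o, d + 1)
  else (out, o, d)

def packrocks_alt (s : String) : String :=
  let st := s.toList.foldl packrocksStep ([], 0, 0)
  String.ofList (PySem.Chars.join [] (st.1 ++ [List.replicate st.2.1 'O' ++ List.replicate st.2.2 '.']))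

-- ===== PRECONDITION & SPEC =====
def Spec_packrocks (s : String) (out : String) : Prop := out = packrocks_alt s
instance (s : String) (out : String) : Decidable (Spec_packrocks s out) := by unfold Spec_packrocks; infer_instance

-- ===== CLAIM (what is proved, stated in full; the proofs are below) =====
def Claim_equal_packrocks : Prop := ∀ (s : String), Dom_packrocks s → Spec_packrocks s (packrocks s)

-- ===== LEMMAS AND PROOFS =====

-- the common specification: B's scan written as structural recursion
def pvF : List Char → Nat → Nat → List Char
  | [], o, d => List.replicate o 'O' ++ List.replicate d '.'
  | c :: r, o, d =>
    if c = '#' then List.replicate o 'O' ++ List.replicate d '.' ++ '#' :: pvF r 0 0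
    else if c = 'O' then pvF r (o + 1) d
    else if c = '.' then pvF r o (d + 1)
    else pvF r o d

-- first '#'-free segment and remaining segments
def pvSeg : List Char → List Char × List (List Char)
  | [] => ([], [])
  | c :: r =>
    let (p, ps) := pvSeg r
    if c = '#' then ([], p :: ps) else (c :: p, ps)

def pvPackSeg (p : List Char) : List Char :=
  List.replicate (p.count 'O') 'O' ++ List.replicate (p.count '.') '.'

lemma pv_count_go_singleton (c : Char) : ∀ (fuel : Nat) (l : List Char) (acc : Nat),
    l.length ≤ fuel → PySem.Chars.count.go [c] fuel l acc = acc + l.count c := by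
  intro fuel
  induction fuel with
  | zero =>
    intro l acc h
    have : l = [] := List.eq_nil_of_length_eq_zero (Nat.le_zero.mp h)
    subst this; simp [PySem.Chars.count.go]
  | succ n ih =>
    intro l acc h
    cases l with
    | nil => simp [PySem.Chars.count.go]
    | cons x t =>
      simp only [PySem.Chars.count.go]
      have hpre : [c].isPrefixOf (x :: t) = (c == x) := by
        simp [List.isPrefixOf]
      rw [hpre]
      by_cases hx : x = c
      · subst hx
        simp only [beq_self_eq_true, if_true, List.length_cons, List.drop_succ_cons,
          List.length_nil, List.drop_zero]
        rw [ih t (acc + 1) (by simpa using Nat.lt_succ_iff.mp (by simpa using h))]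
        simp [List.count_cons]
        omega
      · have : (c == x) = false := beq_eq_false_iff_ne.mpr (fun h => hx h.symm)
        rw [this]
        simp only [if_false, Bool.false_eq_true]
        rw [ih t acc (by simpa using Nat.lt_succ_iff.mp (by simpa using h))]
        simp [List.count_cons, hx]

lemma pv_count_singleton (l : List Char) (c : Char) :
    PySem.Chars.count l [c] = l.count c := by
  simp [PySem.Chars.count, pv_count_go_singleton c l.length l 0 (le_refl _)]

lemma pv_splitOn_go : ∀ (fuel : Nat) (l cur : List Char) (acc : List (List Char)),
    l.length ≤ fuel →
    PySem.Chars.splitOn.go ['#'] fuel l cur acc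
      = acc.reverse ++ (cur.reverse ++ (pvSeg l).1) :: (pvSeg l).2 := by
  intro fuel
  induction fuel with
  | zero =>
    intro l cur acc h
    have : l = [] := List.eq_nil_of_length_eq_zero (Nat.le_zero.mp h)
    subst this; simp [PySem.Chars.splitOn.go, pvSeg]
  | succ n ih =>
    intro l cur acc h
    cases l with
    | nil => simp [PySem.Chars.splitOn.go, pvSeg]
    | cons x t =>
      simp only [PySem.Chars.splitOn.go]
      have hpre : ['#'].isPrefixOf (x :: t) = ('#' == x) := by
        simp [List.isPrefixOf]
      rw [hpre]
      have ht : t.length ≤ n := Nat.lt_succ_iff.mp (by simpa using h)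
      by_cases hx : x = '#'
      · subst hx
        simp only [beq_self_eq_true, if_true, List.length_cons, List.drop_succ_cons,
          List.length_nil, List.drop_zero]
        rw [ih t [] (List.reverse cur :: acc) ht]
        simp [pvSeg]
      · have : ('#' == x) = false := beq_eq_false_iff_ne.mpr (fun h => hx h.symm)
        rw [this]
        simp only [if_false, Bool.false_eq_true]
        rw [ih t (x :: cur) acc ht]
        simp [pvSeg, hx]

lemma pv_splitOn_sharp (l : List Char) :
    PySem.Chars.splitOn l ['#'] = (pvSeg l).1 :: (pvSeg l).2 := by
  simp [PySem.Chars.splitOn, pv_splitOn_go (l.length + 1) l [] [] (by omega)]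

lemma pv_join_empty : ∀ (parts : List (List Char)),
    PySem.Chars.join [] parts = parts.flatten := by
  intro parts
  induction parts with
  | nil => simp [PySem.Chars.join_nil]
  | cons p rest ih =>
    cases rest with
    | nil => simp [PySem.Chars.join_singleton]
    | cons q r =>
      rw [PySem.Chars.join_cons_cons, ih]
      simp

lemma pv_join_sharp_cons : ∀ (ps : List (List Char)) (a : List Char),
    PySem.Chars.join ['#'] (a :: ps) = a ++ ps.flatMap (fun p => '#' :: p) := by
  intro ps
  induction ps with
  | nil => intro a; simp [PySem.Chars.join_singleton]
  | cons q r ih =>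
    intro a
    rw [PySem.Chars.join_cons_cons, ih q]
    simp

lemma pv_foldl_append_singleton {α β : Type} (g : α → β) :
    ∀ (l : List α) (acc : List β),
    l.foldl (fun acc p => acc ++ [g p]) acc = acc ++ l.map g := by
  intro l
  induction l with
  | nil => intro acc; simp
  | cons x t ih => intro acc; simp [List.foldl, ih]

lemma pv_A_eq : ∀ (l : List Char) (o d : Nat),
    List.replicate (o + ((pvSeg l).1).count 'O') 'O' ++
      (List.replicate (d + ((pvSeg l).1).count '.') '.' ++
        (pvSeg l).2.flatMap (fun p => '#' :: pvPackSeg p)) = pvF l o d := by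
  intro l
  induction l with
  | nil => intro o d; simp [pvSeg, pvF]
  | cons c r ih =>
    intro o d
    by_cases hc : c = '#'
    · subst hc
      simp only [pvSeg, pvF, if_true]
      have := ih 0 0
      simp only [Nat.zero_add] at this
      rw [← this]
      simp [pvPackSeg, List.replicate_add, List.flatMap_cons]
    · by_cases hO : c = 'O'
      · subst hO
        simp only [pvSeg, pvF, if_neg hc, if_true, reduceCtorEq, reduceIte]
        rw [← ih (o + 1) d]
        simp
        omega
      · by_cases hD : c = '.'
        · subst hD
          simp only [pvSeg, pvF, if_neg hc, if_neg hO, if_true, reduceCtorEq, reduceIte]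
          rw [← ih o (d + 1)]
          simp
          omega
        · simp only [pvSeg, pvF, if_neg hc, if_neg hO, if_neg hD]
          rw [← ih o d]
          simp [List.count_cons, hO, hD]

lemma pv_B_fold : ∀ (l : List Char) (out : List (List Char)) (o d : Nat),
    (l.foldl packrocksStep (out, o, d)).1.flatten ++
      (List.replicate (l.foldl packrocksStep (out, o, d)).2.1 'O' ++
        List.replicate (l.foldl packrocksStep (out, o, d)).2.2 '.')
      = out.flatten ++ pvF l o d := by
  intro l
  induction l with
  | nil => intro out o d; simp [pvF]
  | cons c r ih =>
    intro out o d
    by_cases hc : c = '#'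
    · subst hc
      simp only [List.foldl_cons, packrocksStep, if_true]
      rw [ih]
      simp [pvF]
    · by_cases hO : c = 'O'
      · subst hO
        simp only [List.foldl_cons, packrocksStep, if_neg hc, reduceCtorEq, reduceIte]
        rw [ih]
        simp [pvF]
      · by_cases hD : c = '.'
        · subst hD
          simp only [List.foldl_cons, packrocksStep, if_neg hc, if_neg hO, reduceCtorEq, reduceIte]
          rw [ih]
          simp [pvF]
        · simp only [List.foldl_cons, packrocksStep, if_neg hc, if_neg hO, if_neg hD]
          rw [ih]
          simp [pvF, hc, hO, hD]

lemma pv_A_val (s : String) : packrocks s = String.ofList (pvF s.toList 0 0) := by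
  unfold packrocks
  dsimp only
  rw [pv_splitOn_sharp, pv_foldl_append_singleton
    (fun p => List.replicate (PySem.Chars.count p ['O']) 'O' ++
      List.replicate (PySem.Chars.count p ['.']) '.')]
  simp only [List.nil_append, List.map_cons]
  rw [pv_join_sharp_cons]
  congr 1
  have h : ∀ p : List Char,
      (List.replicate (PySem.Chars.count p ['O']) 'O' ++
        List.replicate (PySem.Chars.count p ['.']) '.') = pvPackSeg p := by
    intro p; simp [pvPackSeg, pv_count_singleton]
  rw [h]
  have hmap : (pvSeg s.toList).2.map (fun p =>
      List.replicate (PySem.Chars.count p ['O']) 'O' ++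
        List.replicate (PySem.Chars.count p ['.']) '.') = (pvSeg s.toList).2.map pvPackSeg := by
    simp [h]
  rw [hmap, ← pv_A_eq s.toList 0 0]
  simp [List.flatMap_map, pvPackSeg]

lemma pv_B_val (s : String) : packrocks_alt s = String.ofList (pvF s.toList 0 0) := by
  unfold packrocks_alt
  dsimp only
  rw [pv_join_empty]
  congr 1
  have := pv_B_fold s.toList [] 0 0
  simpa using this

-- ===== VERDICT (by name: the statement is the Claim_ definition above) =====
theorem packrocks_spec : Claim_equal_packrocks := by
  intro s _
  unfold Spec_packrocks
  rw [pv_A_val, pv_B_val]
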